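-- pv_equiv track=rewrite | github.com/jaeyun95/Programmers | level2/level2_ex34.py | solution
-- ===== SOURCE A (Python) =====
-- def solution(land):
--     answer = 0
--     sum_list = [0]*4
--     for row in land:
--         pre_sum_lsit = sum_list[:]
--         for i in range(len(row)):
--             sum_list[i] = row[i] + max(pre_sum_lsit[i+1:] + pre_sum_lsit[:i])
--     return max(sum_list)
-- ===== SOURCE B (Python) =====
-- def solution(land):
--     sums = [0, 0, 0, 0]
--     for row in land:
--         # single pass: top-two values of the previous accumulated sums
--         if sums[0] >= sums[1]:
--             t1, t2 = sums[0], sums[1]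
--         else:
--             t1, t2 = sums[1], sums[0]
--         for v in sums[2:]:
--             if v > t1:
--                 t1, t2 = v, t1
--             elif v > t2:
--                 t2 = v
--         sums = [row[i] + (t2 if sums[i] == t1 else t1) if i < len(row) else sums[i]
--                 for i in range(4)]
--     best = sums[0]
--     for v in sums[1:]:
--         if v > best:
--             best = v
--     return best
-- ===== Notes on version B (the rewrite author's own statement) =====
-- stated objective: alternative
-- what changed: Instead of recomputing, for every column, the max over two slices of the previous sums, B does one top-two scan of the previous sums per row and adds the best value (or the second best at the best's own column) to each entry.
-- outside the precondition, e.g. on solution([[1, 2, 3, 4, 5]]): A raises IndexError, B returns 4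
import Mathlib
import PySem

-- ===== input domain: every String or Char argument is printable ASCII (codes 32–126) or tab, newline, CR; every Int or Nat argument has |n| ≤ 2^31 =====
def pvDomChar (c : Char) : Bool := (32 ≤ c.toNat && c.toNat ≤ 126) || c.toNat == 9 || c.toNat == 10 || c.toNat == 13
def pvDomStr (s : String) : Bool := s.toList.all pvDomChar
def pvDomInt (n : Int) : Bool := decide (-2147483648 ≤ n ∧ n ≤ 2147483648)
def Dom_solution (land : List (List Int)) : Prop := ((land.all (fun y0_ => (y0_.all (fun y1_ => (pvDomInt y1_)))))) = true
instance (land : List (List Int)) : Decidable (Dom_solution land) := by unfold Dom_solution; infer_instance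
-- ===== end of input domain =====

-- B replaces A's per-column max over two slices of the previous sums by one top-two scan per row (objective: alternative decomposition).

-- ===== PORT A =====
-- loop body of A: sum_list[i] = row[i] + max(pre[i+1:] + pre[:i]);
-- the `.getD 0` on max? is unreachable: sum_list always has 4 entries, so the slice concatenation has 3
def stepA (sumList row : List Int) : List Int :=
  let pre := PySem.List.slice sumList none none
  (List.range row.length).foldl
    (fun s (i : Nat) =>
      PySem.List.pySetD s (i : Int)
        (row.getD i 0 +
          (PySem.List.max?
            (PySem.List.slice pre (some ((i : Int) + 1)) none ++
             PySem.List.slice pre none (some (i : Int))) id).getD 0)) sumList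

def solution (land : List (List Int)) : Int :=
  (PySem.List.max? (land.foldl stepA [0, 0, 0, 0]) id).getD 0

-- ===== PORT B =====
-- single pass computing (largest, second largest) of the previous sums
def top2 (sums : List Int) : Int × Int :=
  let p0 :=
    if sums.getD 0 0 ≥ sums.getD 1 0 then (sums.getD 0 0, sums.getD 1 0)
    else (sums.getD 1 0, sums.getD 0 0)
  (sums.drop 2).foldl
    (fun (p : Int × Int) v =>
      if v > p.1 then (v, p.1) else if v > p.2 then (p.1, v) else p) p0

def stepB (sums row : List Int) : List Int :=
  let t := top2 sums
  (List.range 4).map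
    (fun i =>
      if i < row.length then row.getD i 0 + (if sums.getD i 0 = t.1 then t.2 else t.1)
      else sums.getD i 0)

def solution_alt (land : List (List Int)) : Int :=
  let sums := land.foldl stepB [0, 0, 0, 0]
  (sums.drop 1).foldl (fun best v => if v > best then v else best) (sums.getD 0 0)

-- ===== PRECONDITION & SPEC =====
-- A raises IndexError (sum_list[i] = … with i ≥ 4) exactly when some row has more than 4 entries; those inputs are excluded.
def Pre_solution (land : List (List Int)) : Prop := ∀ r ∈ land, r.length ≤ 4
instance (land : List (List Int)) : Decidable (Pre_solution land) := by
  unfold Pre_solution; infer_instance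
def pvWitness_solution : List (List Int) := [[1, 2, 3, 5], [5, 6, 7, 8], [4, 3, 2, 1]]
def Spec_solution (land : List (List Int)) (out : Int) : Prop := out = solution_alt land
instance (land : List (List Int)) (out : Int) : Decidable (Spec_solution land out) := by
  unfold Spec_solution; infer_instance

-- ===== CLAIM (what is proved, stated in full; the proofs are below) =====
def Claim_equal_solution : Prop :=
  ∀ (land : List (List Int)), Dom_solution land → Pre_solution land →
    Spec_solution land (solution land)

-- ===== LEMMAS AND PROOFS =====

-- Python's max of a nonempty Int list, and its fold/⊔ characterisation
def mx (l : List Int) : Int := (PySem.List.max? l id).getD 0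

def maxStep (acc : Option Int) (x : Int) : Option Int :=
  match acc with
  | none => some x
  | some m => if (id m : Int) < id x then some x else some m

lemma max?_eq_foldl_maxStep (l : List Int) :
    PySem.List.max? l (id : Int → Int) = List.foldl maxStep none l := by
  unfold PySem.List.max?
  congr 1
  funext acc x
  cases acc <;> rfl

lemma maxStep_some (m x : Int) : maxStep (some m) x = some (max m x) := by
  simp only [maxStep, id]; split_ifs <;> simp <;> omega

lemma foldl_maxStep_some (l : List Int) : ∀ m : Int,
    List.foldl maxStep (some m) l = some (l.foldl max m) := by
  induction l with
  | nil => intro m; rfl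
  | cons x l ih => intro m; rw [List.foldl_cons, maxStep_some, ih, List.foldl_cons]

lemma mx_cons (x : Int) (l : List Int) : mx (x :: l) = l.foldl max x := by
  rw [mx, max?_eq_foldl_maxStep, List.foldl_cons]
  show (List.foldl maxStep (some x) l).getD 0 = _
  rw [foldl_maxStep_some]; rfl

lemma mx3 (u v w : Int) : mx [u, v, w] = max (max u v) w := by
  rw [mx_cons]; rfl

-- B's addend at column i equals A's max over the other three entries
def pick (s : List Int) (v : Int) : Int :=
  if v = (top2 s).1 then (top2 s).2 else (top2 s).1

set_option maxHeartbeats 1000000 in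
lemma pick_eq (a b c d : Int) :
    pick [a, b, c, d] a = mx [b, c, d] ∧ pick [a, b, c, d] b = mx [c, d, a] ∧
    pick [a, b, c, d] c = mx [d, a, b] ∧ pick [a, b, c, d] d = mx [a, b, c] := by
  simp only [show mx [b,c,d] = max (max b c) d from mx3 _ _ _,
    show mx [c,d,a] = max (max c d) a from mx3 _ _ _,
    show mx [d,a,b] = max (max d a) b from mx3 _ _ _,
    show mx [a,b,c] = max (max a b) c from mx3 _ _ _]
  simp [pick, top2]
  split_ifs <;> refine ⟨by omega, by omega, by omega, by omega⟩

set_option maxHeartbeats 1000000 in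
lemma step_eq (a b c d : Int) (row : List Int) (h : row.length ≤ 4) :
    stepA [a, b, c, d] row = stepB [a, b, c, d] row := by
  obtain ⟨h1, h2, h3, h4⟩ := pick_eq a b c d
  match row, h with
  | [], _ =>
      simp [stepA, stepB, List.range_succ]
  | [x], _ =>
      have hA : stepA [a,b,c,d] [x] = [x + mx [b,c,d], b, c, d] := by
        simp [stepA, mx, PySem.List.slice, PySem.List.clampIdx, List.range_succ, List.set]
      have hB : stepB [a,b,c,d] [x] = [x + pick [a,b,c,d] a, b, c, d] := by
        simp [stepB, pick, List.range_succ]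
      rw [hA, hB, h1]
  | [x, y], _ =>
      have hA : stepA [a,b,c,d] [x,y] = [x + mx [b,c,d], y + mx [c,d,a], c, d] := by
        simp [stepA, mx, PySem.List.slice, PySem.List.clampIdx, List.range_succ, List.set]
      have hB : stepB [a,b,c,d] [x,y] =
          [x + pick [a,b,c,d] a, y + pick [a,b,c,d] b, c, d] := by
        simp [stepB, pick, List.range_succ]
      rw [hA, hB, h1, h2]
  | [x, y, z], _ =>
      have hA : stepA [a,b,c,d] [x,y,z] =
          [x + mx [b,c,d], y + mx [c,d,a], z + mx [d,a,b], d] := by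
        simp [stepA, mx, PySem.List.slice, PySem.List.clampIdx, List.range_succ, List.set]
      have hB : stepB [a,b,c,d] [x,y,z] =
          [x + pick [a,b,c,d] a, y + pick [a,b,c,d] b, z + pick [a,b,c,d] c, d] := by
        simp [stepB, pick, List.range_succ]
      rw [hA, hB, h1, h2, h3]
  | [x, y, z, w], _ =>
      have hA : stepA [a,b,c,d] [x,y,z,w] =
          [x + mx [b,c,d], y + mx [c,d,a], z + mx [d,a,b], w + mx [a,b,c]] := by
        simp [stepA, mx, PySem.List.slice, PySem.List.clampIdx, List.range_succ, List.set]
      have hB : stepB [a,b,c,d] [x,y,z,w] =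
          [x + pick [a,b,c,d] a, y + pick [a,b,c,d] b,
           z + pick [a,b,c,d] c, w + pick [a,b,c,d] d] := by
        simp [stepB, pick, List.range_succ]
      rw [hA, hB, h1, h2, h3, h4]

lemma stepB_len (s row : List Int) : (stepB s row).length = 4 := by
  simp [stepB]

lemma fold_eq (L : List (List Int)) : ∀ s : List Int, s.length = 4 →
    (∀ r ∈ L, r.length ≤ 4) → L.foldl stepA s = L.foldl stepB s := by
  induction L with
  | nil => intro s _ _; rfl
  | cons r L ih =>
      intro s hs h
      match s, hs with
      | [a, b, c, d], _ =>
          simp only [List.foldl_cons, step_eq a b c d r (h r (by simp))]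
          exact ih _ (stepB_len _ _) (fun r' hr' => h r' (by simp [hr']))

lemma foldB_len (L : List (List Int)) : ∀ s : List Int, s.length = 4 →
    (L.foldl stepB s).length = 4 := by
  induction L with
  | nil => intro s hs; exact hs
  | cons r L ih => intro s _; exact ih _ (stepB_len _ _)

lemma final_eq (w x y z : Int) :
    mx [w, x, y, z] =
      [x, y, z].foldl (fun best v => if v > best then v else best) w := by
  rw [mx_cons]
  simp [List.foldl_cons]
  split_ifs <;> omega

-- ===== VERDICT (by name: the statement is the Claim_ definition above) =====
theorem solution_spec : Claim_equal_solution := by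
  intro land _ hpre
  unfold Spec_solution solution solution_alt
  rw [fold_eq land [0,0,0,0] (by rfl) hpre]
  have hlen : (land.foldl stepB [0,0,0,0]).length = 4 := foldB_len land _ (by rfl)
  match hS : land.foldl stepB [0,0,0,0], hlen with
  | [w, x, y, z], _ =>
      show mx [w, x, y, z] = _
      rw [final_eq]
      rfl
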